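-- pv_equiv track=rewrite | github.com/neoshrew/adventofcode | 2019/12/solve_2.py | resolve_set
-- ===== SOURCE A (Python) =====
-- from itertools import count
--
-- def set_step(points, velocities):
--     for a, point_a in enumerate(points):
--         for b, point_b in enumerate(points[a+1:], a+1):
--             if point_a < point_b:
--                 velocities[a] += 1
--                 velocities[b] -= 1
--             elif point_a > point_b:
--                 velocities[a] -= 1
--                 velocities[b] += 1
--
--     for i, velocity in enumerate(velocities):
--         points[i] += velocity
--
-- def resolve_set(points):
--     velocities = [0]*len(points)
--     def frz():
--         return (tuple(points), tuple(velocities))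
--     first = frz()
--
--     for i in count(1):
--         set_step(points, velocities)
--         if first == frz():
--             return i
-- ===== SOURCE B (Python) =====
-- def resolve_set(points):
--     # Floyd's tortoise-and-hare cycle detection: the simulation step is a
--     # bijection, so the orbit is purely periodic and the slow and fast
--     # trajectories first meet exactly after one full period.
--     def advance(pts, vel):
--         deltas = [sum((p < q) - (q < p) for q in pts) for p in pts]
--         for i in range(len(pts)):
--             vel[i] += deltas[i]
--         for i in range(len(pts)):
--             pts[i] += vel[i]
--     vel = [0] * len(points)
--     fast_p, fast_v = list(points), list(vel)
--     t = 0
--     while True: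
--         t += 1
--         advance(points, vel)
--         advance(fast_p, fast_v)
--         advance(fast_p, fast_v)
--         if points == fast_p and vel == fast_v:
--             return t
-- ===== Notes on version B (the rewrite author's own statement) =====
-- stated objective: alternative
-- what changed: B replaces A's compare-against-the-stored-initial-state search with Floyd's tortoise-and-hare cycle detection (correct because the simulation step is a bijection, so the orbit is purely periodic and slow/fast first meet exactly at the period), and computes each moon's velocity change as an independent sign-sum instead of A's symmetric pairwise +1/-1 updates.
import Mathlib
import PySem

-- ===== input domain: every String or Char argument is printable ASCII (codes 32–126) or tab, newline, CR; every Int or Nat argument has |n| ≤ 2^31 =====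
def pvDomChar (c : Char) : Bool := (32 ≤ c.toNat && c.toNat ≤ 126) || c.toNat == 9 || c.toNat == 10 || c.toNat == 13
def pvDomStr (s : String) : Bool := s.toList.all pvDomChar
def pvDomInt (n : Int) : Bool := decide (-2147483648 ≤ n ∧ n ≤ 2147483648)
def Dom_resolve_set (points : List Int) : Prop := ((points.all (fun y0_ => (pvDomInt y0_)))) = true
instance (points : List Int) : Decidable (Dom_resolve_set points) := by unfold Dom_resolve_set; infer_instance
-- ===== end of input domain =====

-- B replaces A's compare-against-the-initial-state search with Floyd's tortoise-and-hare cycle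
-- detection (the step map is a bijection, so the orbit is purely periodic and slow/fast first meet
-- exactly at the period), and computes velocity changes per moon as sign-sums instead of A's
-- symmetric pairwise updates (alternative algorithm, similar cost). Both Pythons mutate `points`
-- in place along the same trajectory and return with `points` restored to its initial value.
-- The unbounded `count(1)`/`while True` loops are ported with the same fuel bound (a totality
-- guard only; both loops consume one fuel per returned-count unit).

-- shared primitive: the transliteration of Python's `xs[i] += d`
def pyAddAt (xs : List Int) (i : Int) (d : Int) : List Int :=
  PySem.List.pySetD xs i (PySem.List.pyGetD xs i 0 + d)

-- ===== PORT A =====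
def set_step (points velocities : List Int) : List Int × List Int :=
  let velocities :=
    (PySem.List.enumerate points 0).foldl (fun vel ap =>
      (PySem.List.enumerate (PySem.List.slice points (some (ap.1 + 1)) none) (ap.1 + 1)).foldl
        (fun vel bp =>
          if ap.2 < bp.2 then pyAddAt (pyAddAt vel ap.1 1) bp.1 (-1)
          else if bp.2 < ap.2 then pyAddAt (pyAddAt vel ap.1 (-1)) bp.1 1
          else vel) vel) velocities
  let points :=
    (PySem.List.enumerate velocities 0).foldl (fun pts iv => pyAddAt pts iv.1 iv.2) points
  (points, velocities)

def resolveLoop (fuel : Nat) (first : List Int × List Int) (pts vel : List Int) (i : Int) : Int :=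
  match fuel with
  | 0 => 0
  | f + 1 =>
    let st := set_step pts vel
    if st = first then i else resolveLoop f first st.1 st.2 (i + 1)

def resolve_set (points : List Int) : Int :=
  let velocities := List.replicate points.length (0 : Int)
  resolveLoop 1000000000 (points, velocities) points velocities 1

-- ===== PORT B =====
def alt_delta (points : List Int) (p : Int) : Int :=
  points.foldl (fun acc q => if p < q then acc + 1 else acc) 0
  - points.foldl (fun acc q => if q < p then acc + 1 else acc) 0

def alt_advance (pts vel : List Int) : List Int × List Int :=
  let deltas := pts.map (fun p => alt_delta pts p)
  let vel := (PySem.List.pyRange 0 (pts.length : Int) 1).foldl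
      (fun v i => pyAddAt v i (PySem.List.pyGetD deltas i 0)) vel
  let pts := (PySem.List.pyRange 0 (pts.length : Int) 1).foldl
      (fun p i => pyAddAt p i (PySem.List.pyGetD vel i 0)) pts
  (pts, vel)

def altLoop (fuel : Nat) (sp sv fp fv : List Int) (t : Int) : Int :=
  match fuel with
  | 0 => 0
  | f + 1 =>
    let t := t + 1
    let s := alt_advance sp sv
    let h1 := alt_advance fp fv
    let h := alt_advance h1.1 h1.2
    if s.1 = h.1 ∧ s.2 = h.2 then t else altLoop f s.1 s.2 h.1 h.2 t

def resolve_set_alt (points : List Int) : Int :=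
  let vel := List.replicate points.length (0 : Int)
  altLoop 1000000000 points vel points vel 0

-- ===== PRECONDITION & SPEC =====
def Spec_resolve_set (points : List Int) (out : Int) : Prop := out = resolve_set_alt points
instance (points : List Int) (out : Int) : Decidable (Spec_resolve_set points out) := by unfold Spec_resolve_set; infer_instance

-- ===== CLAIM (what is proved, stated in full; the proofs are below) =====
def Claim_equal_resolve_set : Prop := ∀ (points : List Int), Dom_resolve_set points → Spec_resolve_set points (resolve_set points)

-- ===== LEMMAS AND PROOFS =====

def addAt (xs : List Int) (k : Nat) (d : Int) : List Int := xs.set k (xs.getD k 0 + d)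

theorem pyAddAt_natCast (xs : List Int) (n : Nat) (d : Int) :
    pyAddAt xs (n : Int) d = addAt xs n d := by
  simp [pyAddAt, addAt, PySem.List.pySetD_natCast, PySem.List.pyGetD_natCast]

theorem getD_addAt (xs : List Int) (k : Nat) (d : Int) (j : Nat) :
    (addAt xs k d).getD j 0 = xs.getD j 0 + (if j = k ∧ k < xs.length then d else 0) := by
  simp only [addAt, List.getD_eq_getElem?_getD, List.getElem?_set]
  by_cases hk : k < xs.length
  · by_cases hj : j = k
    · subst hj; simp [hk, List.getElem?_eq_getElem hk]
    · simp [hj, Ne.symm hj, hk]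
  · by_cases hj : j = k
    · subst hj
      simp [hk, List.getElem?_eq_none (le_of_not_gt hk)]
    · simp [hj, Ne.symm hj, hk]

theorem foldl_if_count (P : Int → Prop) [DecidablePred P] (l : List Int) :
    ∀ acc : Int, l.foldl (fun a q => if P q then a + 1 else a) acc
      = acc + (l.countP (fun q => decide (P q)) : Int) := by
  induction l with
  | nil => simp
  | cons x t ih =>
    intro acc
    simp only [List.foldl_cons, List.countP_cons, ih]
    by_cases h : P x <;> simp [h] <;> push_cast <;> ring

def applyOps (xs : List Int) (ops : List (Nat × Int)) : List Int :=
  ops.foldl (fun v op => addAt v op.1 op.2) xs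

theorem addAt_length (xs : List Int) (k : Nat) (d : Int) :
    (addAt xs k d).length = xs.length := by simp [addAt]

def opVal (k : Nat) (op : Nat × Int) : Int := if op.1 = k then op.2 else 0

def sumAt (k : Nat) (ops : List (Nat × Int)) : Int := (ops.map (opVal k)).sum

theorem getD_applyOps (xs : List Int) (ops : List (Nat × Int))
    (hops : ∀ op ∈ ops, op.1 < xs.length) (j : Nat) :
    (applyOps xs ops).getD j 0 = xs.getD j 0 + sumAt j ops := by
  induction ops generalizing xs with
  | nil => simp [applyOps, sumAt]
  | cons o t ih =>
    have h1 : o.1 < xs.length := hops o (by simp)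
    have h2 : ∀ op ∈ t, op.1 < (addAt xs o.1 o.2).length := by
      intro op hm; rw [addAt_length]; exact hops op (by simp [hm])
    simp only [applyOps, List.foldl_cons, sumAt, List.map_cons, List.sum_cons]
    rw [show (t.foldl (fun v op => addAt v op.1 op.2) (addAt xs o.1 o.2)) = applyOps (addAt xs o.1 o.2) t from rfl] at *
    rw [ih _ h2, getD_addAt]
    simp only [sumAt, opVal, h1, and_true]
    by_cases hj : j = o.1
    · subst hj; simp; ring
    · simp [hj, Ne.symm hj]

def sgn2 (x y : Int) : Int := if x < y then 1 else if y < x then -1 else 0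

def opsInner (a : Nat) (pa : Int) : Nat → List Int → List (Nat × Int)
  | _, [] => []
  | b, q :: qs =>
    (if pa < q then [(a, 1), (b, -1)] else if q < pa then [(a, -1), (b, 1)] else [])
      ++ opsInner a pa (b + 1) qs

theorem sumAt_append (k : Nat) (o1 o2 : List (Nat × Int)) :
    sumAt k (o1 ++ o2) = sumAt k o1 + sumAt k o2 := by simp [sumAt]

theorem sumAt_opsInner_a (pa : Int) (a : Nat) (qs : List Int) :
    ∀ (b0 : Nat), a < b0 →
    sumAt a (opsInner a pa b0 qs) = (qs.map (fun q => sgn2 pa q)).sum := by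
  induction qs with
  | nil => intro b0 _; simp [opsInner, sumAt]
  | cons q t ih =>
    intro b0 hb
    simp only [opsInner, sumAt_append, List.map_cons, List.sum_cons]
    rw [ih (b0+1) (by omega)]
    have hba : b0 ≠ a := by omega
    rcases lt_trichotomy pa q with h | h | h
    · simp [h, sumAt, opVal, sgn2, hba]
    · simp [h.le.not_gt, h ▸ lt_irrefl pa, sumAt, sgn2, h]
    · simp [h.le.not_gt, h, sumAt, opVal, sgn2, hba, h.asymm]

theorem sumAt_opsInner_lt (pa : Int) (a k : Nat) (qs : List Int) :
    ∀ (b0 : Nat), k < b0 → k ≠ a → sumAt k (opsInner a pa b0 qs) = 0 := by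
  induction qs with
  | nil => intro b0 _ _; simp [opsInner, sumAt]
  | cons q t ih =>
    intro b0 hb hka
    simp only [opsInner, sumAt_append]
    rw [ih (b0+1) (by omega) hka]
    have h1 : a ≠ k := Ne.symm hka
    have h2 : b0 ≠ k := by omega
    rcases lt_trichotomy pa q with h | h | h <;>
      simp [h, sumAt, opVal, h1, h2] <;> simp [h.le.not_gt, h.asymm, sumAt, opVal, h1, h2]

theorem sumAt_opsInner_b (pa : Int) (a k : Nat) (qs : List Int) :
    ∀ (b0 : Nat), k ≠ a → b0 ≤ k → k - b0 < qs.length →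
    sumAt k (opsInner a pa b0 qs) = sgn2 (qs.getD (k - b0) 0) pa := by
  induction qs with
  | nil => intro b0 _ _ h; simp at h
  | cons q t ih =>
    intro b0 hka hb hlen
    simp only [opsInner, sumAt_append]
    have h1 : a ≠ k := Ne.symm hka
    by_cases hbk : b0 = k
    · subst hbk
      rw [sumAt_opsInner_lt pa a _ t _ (by omega) hka]
      simp only [Nat.sub_self, List.getD_cons_zero]
      rcases lt_trichotomy pa q with h | h | h
      · simp [h, sumAt, opVal, h1, sgn2, h.asymm]
      · simp [h, sumAt, opVal, h1, sgn2]
      · simp [h.le.not_gt, h, sumAt, opVal, h1, sgn2, h.asymm]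
    · have hb' : b0 + 1 ≤ k := by omega
      rw [ih (b0+1) hka hb' (by simp at hlen; omega)]
      have hg : (q :: t).getD (k - b0) 0 = t.getD (k - (b0+1)) 0 := by
        have : k - b0 = (k - (b0+1)) + 1 := by omega
        rw [this]; simp
      rw [← hg]
      rcases lt_trichotomy pa q with h | h | h <;>
        simp [h, sumAt, opVal, h1, hbk] <;> simp [h.le.not_gt, h.asymm, sumAt, opVal, h1, hbk]

def opsOuter : Nat → List Int → List (Nat × Int)
  | _, [] => []
  | s, p :: ps => opsInner s p (s + 1) ps ++ opsOuter (s + 1) ps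

theorem sumAt_opsOuter_lt (k : Nat) (qs : List Int) :
    ∀ (s0 : Nat), k < s0 → sumAt k (opsOuter s0 qs) = 0 := by
  induction qs with
  | nil => intro s0 _; simp [opsOuter, sumAt]
  | cons p t ih =>
    intro s0 hs
    simp only [opsOuter, sumAt_append]
    rw [ih (s0+1) (by omega), sumAt_opsInner_lt p s0 k t (s0+1) (by omega) (by omega)]
    simp

theorem sumAt_opsOuter (k : Nat) (qs : List Int) :
    ∀ (s0 : Nat), s0 ≤ k → k - s0 < qs.length →
    sumAt k (opsOuter s0 qs) = (qs.map (fun q => sgn2 (qs.getD (k - s0) 0) q)).sum := by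
  induction qs with
  | nil => intro s0 _ h; simp at h
  | cons p t ih =>
    intro s0 hs hlen
    simp only [opsOuter, sumAt_append]
    by_cases hk : k = s0
    · subst hk
      rw [sumAt_opsOuter_lt k t (k+1) (by omega), sumAt_opsInner_a p k t (k+1) (by omega)]
      simp [sgn2]
    · have hs' : s0 + 1 ≤ k := by omega
      rw [ih (s0+1) hs' (by simp at hlen; omega)]
      rw [sumAt_opsInner_b p s0 k t (s0+1) (Ne.symm (by omega)) hs' (by simp at hlen; omega)]
      have hg : (p :: t).getD (k - s0) 0 = t.getD (k - (s0+1)) 0 := by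
        have : k - s0 = (k - (s0+1)) + 1 := by omega
        rw [this]; simp
      rw [hg]
      simp only [List.map_cons, List.sum_cons]

theorem mem_opsInner_bound (a : Nat) (pa : Int) (qs : List Int) :
    ∀ (b0 : Nat), a < b0 → ∀ op ∈ opsInner a pa b0 qs, op.1 < b0 + qs.length := by
  induction qs with
  | nil => intro b0 _ op h; simp [opsInner] at h
  | cons q t ih =>
    intro b0 hb op hm
    simp only [opsInner, List.mem_append] at hm
    rcases hm with hm | hm
    · rcases lt_trichotomy pa q with h | h | h
      · simp [h] at hm
        rcases hm with rfl | rfl <;> simp <;> omega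
      · simp [h] at hm
      · simp [h.le.not_gt, h] at hm
        rcases hm with rfl | rfl <;> simp <;> omega
    · have := ih (b0+1) (by omega) op hm
      simp at *; omega

theorem mem_opsOuter_bound (qs : List Int) :
    ∀ (s0 : Nat), ∀ op ∈ opsOuter s0 qs, op.1 < s0 + qs.length := by
  induction qs with
  | nil => intro s0 op h; simp [opsOuter] at h
  | cons p t ih =>
    intro s0 op hm
    simp only [opsOuter, List.mem_append] at hm
    rcases hm with hm | hm
    · have := mem_opsInner_bound s0 p t (s0+1) (by omega) op hm
      simp at *; omega
    · have := ih (s0+1) op hm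
      simp at *; omega

def opsB (pts : List Int) : List (Nat × Int) :=
  (List.range pts.length).map (fun k => (k, alt_delta pts (pts.getD k 0)))

theorem sum_sgn2_count (p : Int) (l : List Int) :
    (l.map (fun q => sgn2 p q)).sum
      = (l.countP (fun q => decide (p < q)) : Int) - (l.countP (fun q => decide (q < p)) : Int) := by
  induction l with
  | nil => simp
  | cons x t ih =>
    simp only [List.map_cons, List.sum_cons, List.countP_cons, ih]
    rcases lt_trichotomy p x with h | h | h
    · simp [sgn2, h, h.asymm]; push_cast; ring
    · simp [sgn2, h]
    · simp [sgn2, h, h.asymm, h.le.not_gt]; push_cast; ring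

theorem sum_sgn2_eq_delta (p : Int) (l : List Int) :
    (l.map (fun q => sgn2 p q)).sum = alt_delta l p := by
  rw [sum_sgn2_count, alt_delta,
    foldl_if_count (fun q => p < q) l 0, foldl_if_count (fun q => q < p) l 0]
  simp

theorem sum_range_ite (v : Nat → Int) (k : Nat) :
    ∀ n : Nat, k < n → ((List.range n).map (fun j => if j = k then v j else 0)).sum = v k := by
  intro n
  induction n with
  | zero => omega
  | succ m ih =>
    intro h
    rw [List.range_succ]
    by_cases hk : k = m
    · subst hk
      have : ((List.range k).map (fun j => if j = k then v j else 0)).sum = 0 := by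
        apply List.sum_eq_zero; intro x hx
        simp only [List.mem_map] at hx
        obtain ⟨j, hj, rfl⟩ := hx
        simp at hj
        simp [Nat.ne_of_lt hj]
      simp [this]
    · have hk' : k < m := by omega
      simp [ih hk', hk, Ne.symm hk]

theorem sumAt_opsB (pts : List Int) (k : Nat) (hk : k < pts.length) :
    sumAt k (opsB pts) = alt_delta pts (pts.getD k 0) := by
  rw [sumAt, opsB, List.map_map]
  have : (opVal k ∘ fun j => (j, alt_delta pts (pts.getD j 0)))
       = fun j => if j = k then alt_delta pts (pts.getD j 0) else 0 := by
    funext j; simp [opVal]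
  rw [this, sum_range_ite _ k pts.length hk]

def opsW (w : List Int) : List (Nat × Int) :=
  (List.range w.length).map (fun k => (k, w.getD k 0))

theorem sumAt_opsW (w : List Int) (k : Nat) (hk : k < w.length) :
    sumAt k (opsW w) = w.getD k 0 := by
  rw [sumAt, opsW, List.map_map]
  have : (opVal k ∘ fun j => (j, w.getD j 0))
       = fun j => if j = k then w.getD j 0 else 0 := by
    funext j; simp [opVal]
  rw [this, sum_range_ite _ k w.length hk]

theorem applyOps_append (xs : List Int) (o1 o2 : List (Nat × Int)) :
    applyOps xs (o1 ++ o2) = applyOps (applyOps xs o1) o2 := List.foldl_append ..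

theorem pyRange_cast (n : Nat) : PySem.List.pyRange 0 (n:Int) 1 = (List.range n).map (fun k : Nat => (k:Int)) := by
  simp [PySem.List.pyRange_zero_nat]

theorem foldl_castlist (f : List Int → Int → List Int) (l : List Nat) (v : List Int) :
    (l.map (fun k : Nat => (k:Int))).foldl f v = l.foldl (fun a (k : Nat) => f a (k:Int)) v := List.foldl_map ..

theorem inner_fold_eq (pa : Int) (a : Nat) (qs : List Int) :
    ∀ (b0 : Nat) (vel : List Int),
    (PySem.List.enumerate qs (b0 : Int)).foldl (fun vel bp =>
        if pa < bp.2 then pyAddAt (pyAddAt vel (a : Int) 1) bp.1 (-1)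
        else if bp.2 < pa then pyAddAt (pyAddAt vel (a : Int) (-1)) bp.1 1
        else vel) vel
      = applyOps vel (opsInner a pa b0 qs) := by
  induction qs with
  | nil => intro b0 vel; simp [PySem.List.enumerate_nil, opsInner, applyOps]
  | cons q t ih =>
    intro b0 vel
    rw [PySem.List.enumerate_cons, List.foldl_cons]
    have hc : ((b0:Int) + 1) = ((b0 + 1 : Nat) : Int) := by push_cast; ring
    rw [hc, ih (b0+1)]
    simp only [opsInner]
    rcases lt_trichotomy pa q with h | h | h
    · simp only [h, if_pos]
      rw [applyOps_append]
      simp [applyOps, pyAddAt_natCast]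
    · simp [h, lt_irrefl, applyOps]
    · simp only [h.asymm, h, if_neg, if_pos, not_lt_of_gt]
      rw [applyOps_append]
      simp [applyOps, pyAddAt_natCast]

theorem outer_fold_eq (pts0 : List Int) :
    ∀ (suffix : List Int) (s0 : Nat) (vel : List Int), pts0.drop s0 = suffix →
    (PySem.List.enumerate suffix (s0 : Int)).foldl (fun vel ap =>
        (PySem.List.enumerate (PySem.List.slice pts0 (some (ap.1 + 1)) none) (ap.1 + 1)).foldl
          (fun vel bp =>
            if ap.2 < bp.2 then pyAddAt (pyAddAt vel ap.1 1) bp.1 (-1)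
            else if bp.2 < ap.2 then pyAddAt (pyAddAt vel ap.1 (-1)) bp.1 1
            else vel) vel) vel
      = applyOps vel (opsOuter s0 suffix) := by
  intro suffix
  induction suffix with
  | nil => intro s0 vel _; simp [PySem.List.enumerate_nil, opsOuter, applyOps]
  | cons p ps ih =>
    intro s0 vel hdrop
    rw [PySem.List.enumerate_cons, List.foldl_cons]
    have hc : ((s0:Int) + 1) = ((s0 + 1 : Nat) : Int) := by push_cast; ring
    have hdrop' : pts0.drop (s0 + 1) = ps := by
      have h2 := congrArg (List.drop 1) hdrop
      simpa [List.drop_drop, Nat.add_comm] using h2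
    simp only []
    rw [hc, PySem.List.slice_from_natCast, hdrop']
    rw [inner_fold_eq p s0 ps (s0+1)]
    rw [ih (s0+1) _ hdrop']
    rw [opsOuter, applyOps_append]

def opsP : Nat → List Int → List (Nat × Int)
  | _, [] => []
  | s, v :: vs => (s, v) :: opsP (s + 1) vs

theorem enum_fold_eq (w : List Int) :
    ∀ (s0 : Nat) (pts : List Int),
    (PySem.List.enumerate w (s0 : Int)).foldl (fun p iv => pyAddAt p iv.1 iv.2) pts
      = applyOps pts (opsP s0 w) := by
  induction w with
  | nil => intro s0 pts; simp [PySem.List.enumerate_nil, opsP, applyOps]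
  | cons v vs ih =>
    intro s0 pts
    rw [PySem.List.enumerate_cons, List.foldl_cons]
    have hc : ((s0:Int) + 1) = ((s0 + 1 : Nat) : Int) := by push_cast; ring
    rw [hc, ih (s0+1)]
    simp only [opsP, applyOps, List.foldl_cons, pyAddAt_natCast]

theorem opsP_eq (w : List Int) :
    ∀ s0 : Nat, opsP s0 w = (List.range w.length).map (fun k => (s0 + k, w.getD k 0)) := by
  induction w with
  | nil => intro s0; simp [opsP]
  | cons v vs ih =>
    intro s0
    simp only [opsP, ih (s0+1), List.length_cons, List.range_succ_eq_map, List.map_cons,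
      List.map_map]
    congr 1
    apply List.map_congr_left
    intro k _
    simp [Function.comp, Nat.succ_eq_add_one]
    omega

theorem set_step_eq_applyOps (pts vel : List Int) :
    set_step pts vel =
      (applyOps pts (opsP 0 (applyOps vel (opsOuter 0 pts))),
       applyOps vel (opsOuter 0 pts)) := by
  have ho := outer_fold_eq pts pts 0 vel rfl
  have he := enum_fold_eq (applyOps vel (opsOuter 0 pts)) 0 pts
  simp only [Nat.cast_zero] at ho he
  simp only [set_step]
  rw [ho, he]

theorem applyOps_length (xs : List Int) (ops : List (Nat × Int)) :
    (applyOps xs ops).length = xs.length := by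
  induction ops generalizing xs with
  | nil => rfl
  | cons o t ih =>
    show (applyOps (addAt xs o.1 o.2) t).length = xs.length
    rw [ih, addAt_length]

-- the vector characterisation of one simulation step
def accVec (p : List Int) : List Int := p.map (fun q => alt_delta p q)

theorem applyOps_opsOuter_eq (pts vel : List Int) (h : vel.length = pts.length) :
    applyOps vel (opsOuter 0 pts) = List.zipWith (· + ·) vel (accVec pts) := by
  have hboundA : ∀ op ∈ opsOuter 0 pts, op.1 < vel.length := by
    intro op hm
    have := mem_opsOuter_bound pts 0 op hm
    omega
  have hlA : (applyOps vel (opsOuter 0 pts)).length = vel.length := applyOps_length ..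
  have hlz : (List.zipWith (· + ·) vel (accVec pts)).length = vel.length := by
    simp [accVec]; omega
  apply List.ext_getElem (by omega)
  intro i h1 h2
  have hi : i < pts.length := by omega
  have hiv : i < vel.length := by omega
  rw [List.getElem_zipWith]
  rw [← List.getD_eq_getElem (applyOps vel (opsOuter 0 pts)) 0 h1]
  rw [getD_applyOps vel _ hboundA i]
  rw [sumAt_opsOuter i pts 0 (by omega) (by simpa using hi)]
  simp only [Nat.sub_zero]
  rw [sum_sgn2_eq_delta]
  rw [List.getD_eq_getElem vel 0 hiv]
  simp [accVec, List.getElem?_eq_getElem hi]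

theorem applyOps_opsP_eq (pts w : List Int) (h : w.length = pts.length) :
    applyOps pts (opsP 0 w) = List.zipWith (· + ·) pts w := by
  have hops := opsP_eq w 0
  simp only [Nat.zero_add] at hops
  rw [hops, ← opsW]
  have hbound : ∀ op ∈ opsW w, op.1 < pts.length := by
    intro op hm
    simp only [opsW, List.mem_map, List.mem_range] at hm
    obtain ⟨k, hk, rfl⟩ := hm
    omega
  have hl : (applyOps pts (opsW w)).length = pts.length := applyOps_length ..
  have hlz : (List.zipWith (· + ·) pts w).length = pts.length := by simp; omega
  apply List.ext_getElem (by omega)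
  intro i h1 h2
  have hi : i < w.length := by omega
  have hip : i < pts.length := by omega
  rw [List.getElem_zipWith]
  rw [← List.getD_eq_getElem (applyOps pts (opsW w)) 0 h1]
  rw [getD_applyOps pts _ hbound i, sumAt_opsW w i hi]
  rw [List.getD_eq_getElem pts 0 hip, List.getD_eq_getElem w 0 hi]

theorem set_step_char (pts vel : List Int) (h : vel.length = pts.length) :
    set_step pts vel =
      (List.zipWith (· + ·) pts (List.zipWith (· + ·) vel (accVec pts)),
       List.zipWith (· + ·) vel (accVec pts)) := by
  rw [set_step_eq_applyOps, applyOps_opsOuter_eq pts vel h, applyOps_opsP_eq]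
  simp [accVec]; omega

theorem accVec_length (p : List Int) : (accVec p).length = p.length := by simp [accVec]

theorem zip_add_cancel (w a b : List Int) (ha : a.length = w.length) (hb : b.length = w.length)
    (h : List.zipWith (· + ·) a w = List.zipWith (· + ·) b w) : a = b := by
  apply List.ext_getElem (by omega)
  intro i h1 h2
  have h3 : i < (List.zipWith (· + ·) a w).length := by simp; omega
  have := congrArg (fun l => l[i]?) h
  simp only [List.getElem?_zipWith] at this
  have hia : i < a.length := h1
  have hib : i < b.length := h2
  have hiw : i < w.length := by omega
  rw [List.getElem?_eq_getElem hia, List.getElem?_eq_getElem hib,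
      List.getElem?_eq_getElem hiw] at this
  simp at this
  omega

-- one simulation step on full states, and its iteration
def stateStep (s : List Int × List Int) : List Int × List Int := set_step s.1 s.2

def lenD (s : List Int × List Int) : Prop := s.2.length = s.1.length

def iterState : Nat → (List Int × List Int) → (List Int × List Int)
  | 0, s => s
  | n + 1, s => iterState n (stateStep s)

theorem stateStep_lenD (s : List Int × List Int) (h : lenD s) : lenD (stateStep s) := by
  obtain ⟨p, v⟩ := s
  simp only [lenD] at h ⊢
  rw [stateStep, set_step_char p v h]
  simp only [List.length_zipWith, accVec_length]
  omega

theorem iterState_lenD (n : Nat) : ∀ s, lenD s → lenD (iterState n s) := by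
  induction n with
  | zero => intro s h; exact h
  | succ m ih => intro s h; exact ih _ (stateStep_lenD s h)

theorem iterState_succ' (n : Nat) (s : List Int × List Int) :
    iterState (n + 1) s = stateStep (iterState n s) := by
  induction n generalizing s with
  | zero => rfl
  | succ m ih => exact ih (stateStep s)

theorem stateStep_inj (a b : List Int × List Int) (ha : lenD a) (hb : lenD b)
    (h : stateStep a = stateStep b) : a = b := by
  obtain ⟨p1, v1⟩ := a
  obtain ⟨p2, v2⟩ := b
  simp only [lenD] at ha hb
  rw [stateStep, stateStep, set_step_char p1 v1 ha, set_step_char p2 v2 hb] at h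
  simp only [Prod.mk.injEq] at h
  obtain ⟨h1, h2⟩ := h
  have hw1 : (List.zipWith (· + ·) v1 (accVec p1)).length = p1.length := by
    simp [accVec_length]; omega
  have hw2 : (List.zipWith (· + ·) v2 (accVec p2)).length = p2.length := by
    simp [accVec_length]; omega
  have hlen12 : p1.length = p2.length := by
    have := congrArg List.length h1
    simp [accVec_length] at this
    omega
  have hp : p1 = p2 := by
    apply zip_add_cancel (List.zipWith (· + ·) v1 (accVec p1)) p1 p2 (by omega) (by rw [h2]; omega)
    rw [h1, h2]
  subst hp
  have hv : v1 = v2 := by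
    apply zip_add_cancel (accVec p1) v1 v2 (by rw [accVec_length]; omega) (by rw [accVec_length]; omega)
    exact h2
  simp [hv]

theorem iterState_inj (n : Nat) : ∀ a b, lenD a → lenD b →
    iterState n a = iterState n b → a = b := by
  induction n with
  | zero => intro a b _ _ h; exact h
  | succ m ih =>
    intro a b ha hb h
    rw [iterState_succ', iterState_succ'] at h
    have h2 := stateStep_inj _ _ (iterState_lenD m a ha) (iterState_lenD m b hb) h
    exact ih a b ha hb h2

-- Floyd meeting condition: the hare catches the tortoise exactly when the state is back at the start
theorem meet_iff (x0 : List Int × List Int) (h0 : lenD x0) (t : Nat) :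
    (iterState (t+1) x0 = x0) ↔
    (iterState (t+1) (iterState (t+1) x0) = iterState (t+1) x0) := by
  constructor
  · intro h
    simp [h]
  · intro h
    exact iterState_inj (t+1) (iterState (t+1) x0) x0 (iterState_lenD _ _ h0) h0 h

theorem applyOps_opsB_eq (pts vel : List Int) (h : vel.length = pts.length) :
    applyOps vel (opsB pts) = List.zipWith (· + ·) vel (accVec pts) := by
  have hbound : ∀ op ∈ opsB pts, op.1 < vel.length := by
    intro op hm
    simp only [opsB, List.mem_map, List.mem_range] at hm
    obtain ⟨k, hk, rfl⟩ := hm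
    omega
  have hlA : (applyOps vel (opsB pts)).length = vel.length := applyOps_length ..
  apply List.ext_getElem (by simp [accVec_length]; omega)
  intro i h1 h2
  have hi : i < pts.length := by omega
  have hiv : i < vel.length := by omega
  rw [List.getElem_zipWith]
  rw [← List.getD_eq_getElem (applyOps vel (opsB pts)) 0 h1]
  rw [getD_applyOps vel _ hbound i, sumAt_opsB pts i hi]
  rw [List.getD_eq_getElem vel 0 hiv]
  simp [accVec, List.getElem?_eq_getElem hi]

theorem alt_vel_fold (pts vel : List Int) :
    (PySem.List.pyRange 0 (pts.length : Int) 1).foldl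
        (fun v i => pyAddAt v i (PySem.List.pyGetD (pts.map (fun p => alt_delta pts p)) i 0)) vel
      = applyOps vel (opsB pts) := by
  rw [pyRange_cast, foldl_castlist, applyOps, opsB, List.foldl_map]
  apply PySem.List.foldl_congr_mem
  intro acc k hk
  simp only [List.mem_range] at hk
  rw [pyAddAt_natCast, PySem.List.pyGetD_natCast]
  congr 1
  rw [List.getD_eq_getElem _ 0 (by simpa using hk), List.getD_eq_getElem _ 0 hk]
  simp

theorem alt_pos_fold (pts w : List Int) (hw : w.length = pts.length) :
    (PySem.List.pyRange 0 (pts.length : Int) 1).foldl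
        (fun p i => pyAddAt p i (PySem.List.pyGetD w i 0)) pts
      = applyOps pts (opsW w) := by
  rw [pyRange_cast, foldl_castlist, applyOps, opsW, ← hw, List.foldl_map]
  apply PySem.List.foldl_congr_mem
  intro acc k hk
  simp only [List.mem_range] at hk
  rw [pyAddAt_natCast, PySem.List.pyGetD_natCast]

-- B's advance equals A's step on equal-length states
theorem alt_advance_eq (pts vel : List Int) (h : vel.length = pts.length) :
    alt_advance pts vel = set_step pts vel := by
  have hw : applyOps vel (opsB pts) = applyOps vel (opsOuter 0 pts) := by
    rw [applyOps_opsB_eq pts vel h, applyOps_opsOuter_eq pts vel h]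
  have hwl : (applyOps vel (opsB pts)).length = pts.length := by
    rw [applyOps_length]; omega
  simp only [alt_advance]
  rw [alt_vel_fold pts vel, alt_pos_fold pts _ hwl, hw, set_step_eq_applyOps]
  rw [opsP_eq]
  simp [opsW]

theorem iterState_add (m n : Nat) (s : List Int × List Int) :
    iterState (m + n) s = iterState m (iterState n s) := by
  induction n generalizing s with
  | zero => rfl
  | succ k ih =>
    have h1 : m + (k+1) = (m + k) + 1 := by omega
    rw [h1]
    show iterState (m + k) (stateStep s) = iterState m (iterState k (stateStep s))
    exact ih (stateStep s)

theorem loop_eq (fuel : Nat) :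
    ∀ (x0 : List Int × List Int) (t : Nat), lenD x0 →
    resolveLoop fuel x0 (iterState t x0).1 (iterState t x0).2 ((t : Int) + 1)
      = altLoop fuel (iterState t x0).1 (iterState t x0).2
          (iterState (2*t) x0).1 (iterState (2*t) x0).2 (t : Int) := by
  induction fuel with
  | zero => intro x0 t _; rfl
  | succ f ih =>
    intro x0 t h0
    have hst : lenD (iterState t x0) := iterState_lenD t x0 h0
    have hft : lenD (iterState (2*t) x0) := iterState_lenD _ x0 h0
    have hs1 : lenD (iterState (2*t+1) x0) := iterState_lenD _ x0 h0
    have e1 : set_step (iterState t x0).1 (iterState t x0).2 = iterState (t+1) x0 := by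
      rw [iterState_succ' t x0]; rfl
    have e2 : set_step (iterState (2*t) x0).1 (iterState (2*t) x0).2 = iterState (2*t+1) x0 := by
      rw [iterState_succ' (2*t) x0]; rfl
    have e3 : set_step (iterState (2*t+1) x0).1 (iterState (2*t+1) x0).2
        = iterState (2*t+1+1) x0 := by
      rw [iterState_succ' (2*t+1) x0]; rfl
    have hiter : iterState (2*t+1+1) x0 = iterState (t+1) (iterState (t+1) x0) := by
      rw [← iterState_add]; congr 1; omega
    have hcond : (iterState (t+1) x0 = x0) ↔
        ((iterState (t+1) x0).1 = (iterState (2*t+1+1) x0).1 ∧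
         (iterState (t+1) x0).2 = (iterState (2*t+1+1) x0).2) := by
      rw [hiter, meet_iff x0 h0 t]
      constructor
      · intro h; exact ⟨congrArg Prod.fst h.symm, congrArg Prod.snd h.symm⟩
      · intro hh; exact Prod.ext hh.1.symm hh.2.symm
    simp only [resolveLoop, altLoop]
    rw [alt_advance_eq _ _ hst, alt_advance_eq _ _ hft, e2,
        alt_advance_eq _ _ hs1, e3, e1]
    by_cases hc : iterState (t+1) x0 = x0
    · rw [if_pos hc, if_pos (hcond.mp hc)]
    · rw [if_neg hc, if_neg (fun hh => hc (hcond.mpr hh))]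
      rw [show 2*t+1+1 = 2*(t+1) from by omega]
      rw [show ((t:Int)+1+1) = (((t+1 : Nat)):Int)+1 from by push_cast; ring,
          show ((t:Int)+1) = (((t+1 : Nat)):Int) from by push_cast; ring]
      exact ih x0 (t+1) h0

-- ===== VERDICT (by name: the statement is the Claim_ definition above) =====
theorem resolve_set_spec : Claim_equal_resolve_set := by
  intro points _
  unfold Spec_resolve_set resolve_set resolve_set_alt
  have h := loop_eq 1000000000 (points, List.replicate points.length (0 : Int)) 0
    (by simp [lenD])
  simpa [iterState] using h
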